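-- pv_equiv track=rewrite | github.com/MartinVeselyTul/CVUT_HCM_semestral | python_scripts/followers_increase.py | last_followers_count
-- ===== SOURCE A (Python) =====
-- def last_followers_count(data):
--     export_data = {}
--     for i in range(0, len(data), 3):
--         if data[i] not in export_data.keys():
--             export_data[data[i]] = data[i+1], data[i+2] #id: {followers, timestamp}
--         else:
--             if export_data[data[i]][1] < data[i+2]:
--                 export_data[data[i]] = data[i+1], data[i+2]
--     return export_data
-- ===== SOURCE B (Python) =====
-- def last_followers_count(data):
--     groups = {}
--     for i in range(0, len(data), 3):
--         groups[data[i]] = groups.get(data[i], []) + [(data[i + 1], data[i + 2])]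
--     return {k: max(recs, key=lambda r: r[1]) for k, recs in groups.items()}
-- ===== Notes on version B (the rewrite author's own statement) =====
-- stated objective: alternative
-- what changed: B first groups all (followers, timestamp) records per id into a dict of lists and then reduces each group with max(key=timestamp), instead of A's single pass that maintains a running latest record per id.
import Mathlib
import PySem

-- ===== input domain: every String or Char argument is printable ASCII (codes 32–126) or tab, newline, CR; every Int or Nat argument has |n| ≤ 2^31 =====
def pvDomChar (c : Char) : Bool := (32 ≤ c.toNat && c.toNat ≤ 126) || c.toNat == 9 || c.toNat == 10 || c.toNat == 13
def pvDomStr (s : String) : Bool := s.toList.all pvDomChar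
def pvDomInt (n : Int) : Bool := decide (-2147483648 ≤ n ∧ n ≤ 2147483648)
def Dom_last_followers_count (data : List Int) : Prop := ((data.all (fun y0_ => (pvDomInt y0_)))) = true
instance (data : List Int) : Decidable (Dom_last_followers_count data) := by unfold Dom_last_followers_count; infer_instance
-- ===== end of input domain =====

-- B groups records per id in one pass and then reduces each group with max-by-timestamp:
-- a group-then-reduce decomposition instead of A's running-max dict update ('alternative', not faster).

-- ===== PORT A =====
-- A's loop body: one step of 'for i in range(0, len(data), 3)'; the wildcard arm is the
-- IndexError case (data[i+1]/data[i+2] past the end), excluded by Pre_.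
def lfcStepA (data : List Int) (d : PySem.Dict Int (Int × Int)) (i : Int) :
    PySem.Dict Int (Int × Int) :=
  match PySem.List.pyGet? data i, PySem.List.pyGet? data (i+1), PySem.List.pyGet? data (i+2) with
  | some k, some f, some t =>
      if ¬ d.contains k then d.insert k (f, t)              -- data[i] not in export_data.keys()
      else if (d.getD k (0, 0)).2 < t then d.insert k (f, t)  -- export_data[data[i]][1] < data[i+2]
      else d
  | _, _, _ => d

def last_followers_count (data : List Int) : List (Int × Int × Int) :=
  ((PySem.List.pyRange 0 (data.length : Int) 3).foldl (lfcStepA data) PySem.Dict.empty).items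

-- ===== PORT B =====
-- B's first pass: groups[data[i]] = groups.get(data[i], []) + [(data[i+1], data[i+2])]
def lfcStepB (data : List Int) (g : PySem.Dict Int (List (Int × Int))) (i : Int) :
    PySem.Dict Int (List (Int × Int)) :=
  match PySem.List.pyGet? data i, PySem.List.pyGet? data (i+1), PySem.List.pyGet? data (i+2) with
  | some k, some f, some t => g.insert k (g.getD k [] ++ [(f, t)])
  | _, _, _ => g

-- max(recs, key=lambda r: r[1]); the none arm is Python's ValueError on an empty
-- sequence, unreachable because every group is nonempty.
def lfcMax (recs : List (Int × Int)) : Int × Int :=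
  match PySem.List.max? recs (fun r => r.2) with
  | some m => m
  | none => (0, 0)

def last_followers_count_alt (data : List Int) : List (Int × Int × Int) :=
  (((PySem.List.pyRange 0 (data.length : Int) 3).foldl (lfcStepB data) PySem.Dict.empty).items).map
    (fun p => (p.1, lfcMax p.2))

-- ===== PRECONDITION & SPEC =====
-- A raises IndexError on data[i+1]/data[i+2] whenever len(data) is not a multiple of 3.
def Pre_last_followers_count (data : List Int) : Prop := data.length % 3 = 0
instance (data : List Int) : Decidable (Pre_last_followers_count data) := by
  unfold Pre_last_followers_count; infer_instance

def pvWitness_last_followers_count : List Int := [1, 10, 5, 2, 7, 9, 1, 20, 3]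

def Spec_last_followers_count (data : List Int) (out : List (Int × Int × Int)) : Prop :=
  out = last_followers_count_alt data
instance (data : List Int) (out : List (Int × Int × Int)) :
    Decidable (Spec_last_followers_count data out) := by
  unfold Spec_last_followers_count; infer_instance

-- ===== CLAIM =====
def Claim_equal_last_followers_count : Prop :=
  ∀ (data : List Int), Dom_last_followers_count data → Pre_last_followers_count data →
    Spec_last_followers_count data (last_followers_count data)

-- ===== LEMMAS AND PROOFS =====

-- the list of (id, followers, timestamp) triples the loop visits
def pvChunks : List Int → List (Int × Int × Int)
  | a :: b :: c :: r => (a, b, c) :: pvChunks r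
  | _ => []

-- A's loop body on a decoded triple
def pvFA (d : PySem.Dict Int (Int × Int)) (c : Int × Int × Int) : PySem.Dict Int (Int × Int) :=
  if ¬ d.contains c.1 then d.insert c.1 (c.2.1, c.2.2)
  else if (d.getD c.1 (0, 0)).2 < c.2.2 then d.insert c.1 (c.2.1, c.2.2)
  else d

-- B's first-pass loop body on a decoded triple
def pvFB (g : PySem.Dict Int (List (Int × Int))) (c : Int × Int × Int) :
    PySem.Dict Int (List (Int × Int)) :=
  g.insert c.1 (g.getD c.1 [] ++ [(c.2.1, c.2.2)])

-- B's second pass, as a dict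
def pvReduce (g : PySem.Dict Int (List (Int × Int))) : PySem.Dict Int (Int × Int) :=
  PySem.Dict.mk (g.items.map (fun p => (p.1, lfcMax p.2)))

lemma pvRange3_cons (n : Int) (hn : 0 ≤ n) :
    PySem.List.pyRange 0 (n + 3) 3 = 0 :: (PySem.List.pyRange 0 n 3).map (fun j => 3 + j) := by
  rw [PySem.List.pyRange_of_pos _ _ (by omega : (0:Int) < 3),
      PySem.List.pyRange_of_pos _ _ (by omega : (0:Int) < 3)]
  have h1 : (if (0:Int) < n + 3 then ((n + 3 - 0 + 3 - 1) / 3).toNat else 0)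
      = (if (0:Int) < n then ((n - 0 + 3 - 1) / 3).toNat else 0) + 1 := by
    split_ifs <;> omega
  rw [h1, List.range_succ_eq_map]
  simp [List.map_map, Function.comp]
  intro k _
  ring

lemma pvShift3 (a b c : Int) (r : List Int) (j : Int) (hj : 0 ≤ j) :
    PySem.List.pyGet? (a :: b :: c :: r) (3 + j) = PySem.List.pyGet? r j := by
  rw [PySem.List.pyGet?_of_nonneg _ (by omega), PySem.List.pyGet?_of_nonneg _ hj]
  have : (3 + j).toNat = j.toNat + 1 + 1 + 1 := by omega
  rw [this]
  simp

-- collapse the 'for i in range(0, len(data), 3)' fold into a fold over the triples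
lemma pvFoldlRange3 {σ : Type} (step : σ → Int × Int × Int → σ) :
    ∀ (data : List Int), data.length % 3 = 0 → ∀ (init : σ),
      (PySem.List.pyRange 0 (data.length : Int) 3).foldl
        (fun s i =>
          match PySem.List.pyGet? data i, PySem.List.pyGet? data (i+1),
                PySem.List.pyGet? data (i+2) with
          | some a, some b, some c => step s (a, b, c)
          | _, _, _ => s) init
      = (pvChunks data).foldl step init := by
  intro data
  induction data using pvChunks.induct with
  | case1 a b c r ih =>
    intro hlen init
    have hlr : r.length % 3 = 0 := by simp at hlen; omega
    have hcast : ((a :: b :: c :: r).length : Int) = (r.length : Int) + 3 := by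
      simp; ring
    rw [hcast, pvRange3_cons _ (by positivity)]
    rw [List.foldl_cons, List.foldl_map]
    have h0 : PySem.List.pyGet? (a :: b :: c :: r) 0 = some a := by
      rw [PySem.List.pyGet?_of_nonneg _ (by omega)]; rfl
    have h1 : PySem.List.pyGet? (a :: b :: c :: r) (0+1) = some b := by
      rw [PySem.List.pyGet?_of_nonneg _ (by omega)]; rfl
    have h2 : PySem.List.pyGet? (a :: b :: c :: r) (0+2) = some c := by
      rw [PySem.List.pyGet?_of_nonneg _ (by omega)]; rfl
    rw [show (pvChunks (a :: b :: c :: r)) = (a, b, c) :: pvChunks r from rfl, List.foldl_cons]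
    rw [h0, h1, h2]
    rw [PySem.List.foldl_congr_mem _ _
      (fun s i =>
        match PySem.List.pyGet? r i, PySem.List.pyGet? r (i+1), PySem.List.pyGet? r (i+2) with
        | some a', some b', some c' => step s (a', b', c')
        | _, _, _ => s) _ ?_]
    · exact ih hlr _
    · intro acc j hjmem
      have hj : 0 ≤ j := ((PySem.List.mem_pyRange_iff_of_pos (by omega) j).mp hjmem).1
      have e1 := pvShift3 a b c r j hj
      have e2 : PySem.List.pyGet? (a :: b :: c :: r) (3 + j + 1) = PySem.List.pyGet? r (j + 1) := by
        rw [show 3 + j + 1 = 3 + (j + 1) by ring]; exact pvShift3 _ _ _ _ _ (by omega)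
      have e3 : PySem.List.pyGet? (a :: b :: c :: r) (3 + j + 2) = PySem.List.pyGet? r (j + 2) := by
        rw [show 3 + j + 2 = 3 + (j + 2) by ring]; exact pvShift3 _ _ _ _ _ (by omega)
      simp only [e1, e2, e3]
  | case2 d hshape =>
    intro hlen init
    have hd : d = [] := by
      cases d with
      | nil => rfl
      | cons a t =>
        cases t with
        | nil => simp at hlen
        | cons b u =>
          cases u with
          | nil => simp at hlen
          | cons c r => exact (hshape a b c r rfl).elim
    subst hd
    rw [show ((([] : List Int).length : Int)) = 0 from rfl,
        PySem.List.pyRange_of_pos _ _ (by omega : (0:Int) < 3)]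
    simp [pvChunks]

-- the loop bodies of the two ports, rephrased on decoded triples
lemma pvStepA_eq (data : List Int) :
    lfcStepA data = (fun s i =>
      match PySem.List.pyGet? data i, PySem.List.pyGet? data (i+1),
            PySem.List.pyGet? data (i+2) with
      | some a, some b, some c => pvFA s (a, b, c)
      | _, _, _ => s) := by
  funext d i
  unfold lfcStepA pvFA
  cases PySem.List.pyGet? data i <;>
    cases PySem.List.pyGet? data (i+1) <;>
      cases PySem.List.pyGet? data (i+2) <;> rfl

lemma pvStepB_eq (data : List Int) :
    lfcStepB data = (fun s i =>
      match PySem.List.pyGet? data i, PySem.List.pyGet? data (i+1),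
            PySem.List.pyGet? data (i+2) with
      | some a, some b, some c => pvFB s (a, b, c)
      | _, _, _ => s) := by
  funext g i
  unfold lfcStepB pvFB
  cases PySem.List.pyGet? data i <;>
    cases PySem.List.pyGet? data (i+1) <;>
      cases PySem.List.pyGet? data (i+2) <;> rfl

lemma pvItems_mk {κ ν : Type} [BEq κ] (l : List (κ × ν)) : (PySem.Dict.mk l).items = l := rfl

lemma pvMax_singleton (x : Int × Int) : lfcMax [x] = x := rfl

lemma pvMax_append (l : List (Int × Int)) (x : Int × Int) (hl : l ≠ []) :
    lfcMax (l ++ [x]) = if (lfcMax l).2 < x.2 then x else lfcMax l := by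
  cases hmm : PySem.List.max? l (fun r => r.2) with
  | none => exact absurd ((PySem.List.max?_eq_none_iff _ _).mp hmm) hl
  | some m =>
    have hstep : PySem.List.max? (l ++ [x]) (fun r => r.2)
        = if m.2 < x.2 then some x else some m := by
      simp only [PySem.List.max?, List.foldl_append] at hmm ⊢
      rw [hmm]
      rfl
    unfold lfcMax
    rw [hstep, hmm]
    by_cases h : m.2 < x.2
    · simp [h]
    · simp [h]

lemma pvReduce_keys (g : PySem.Dict Int (List (Int × Int))) :
    (pvReduce g).keys = g.keys := by
  simp [pvReduce, PySem.Dict.keys, pvItems_mk, List.map_map, Function.comp]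

lemma pvReduce_contains (g : PySem.Dict Int (List (Int × Int))) (k : Int) :
    (pvReduce g).contains k = g.contains k := by
  rw [PySem.Dict.contains_eq_decide_mem_keys, PySem.Dict.contains_eq_decide_mem_keys,
      pvReduce_keys]

lemma pvGetD_of_get? {κ ν : Type} [BEq κ] (d : PySem.Dict κ ν) (k : κ) (v w : ν)
    (h : d.get? k = some w) : d.getD k v = w := by
  simp [PySem.Dict.getD, h]

lemma pvGetD_of_none {κ ν : Type} [BEq κ] (d : PySem.Dict κ ν) (k : κ) (v : ν)
    (h : d.get? k = none) : d.getD k v = v := by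
  simp [PySem.Dict.getD, h]

-- one loop step preserves the simulation and the invariants
lemma pvStep_preserve (g : PySem.Dict Int (List (Int × Int))) (c : Int × Int × Int)
    (hnd : g.keys.Nodup) (hne : ∀ p ∈ g.items, p.2 ≠ []) :
    pvFA (pvReduce g) c = pvReduce (pvFB g c) := by
  by_cases hc : g.contains c.1 = true
  · -- id already grouped
    have hget : ∃ old, g.get? c.1 = some old := by
      rw [PySem.Dict.contains_eq_isSome_get?] at hc
      exact Option.isSome_iff_exists.mp hc
    obtain ⟨old, hget⟩ := hget
    have hmem : (c.1, old) ∈ g.items := PySem.Dict.mem_items_of_get?_eq_some g hget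
    have holdne : old ≠ [] := hne _ hmem
    have hrednd : (pvReduce g).keys.Nodup := by rw [pvReduce_keys]; exact hnd
    have hredget : (pvReduce g).get? c.1 = some (lfcMax old) := by
      apply PySem.Dict.get?_of_mem_items _ _ hrednd
      have : ((c.1 : Int), lfcMax old)
          = (fun p : Int × List (Int × Int) => (p.1, lfcMax p.2)) (c.1, old) := rfl
      rw [pvReduce, pvItems_mk, this]
      exact List.mem_map_of_mem hmem
    have hgetD : g.getD c.1 [] = old := pvGetD_of_get? g c.1 [] old hget
    have hredgetD : (pvReduce g).getD c.1 (0, 0) = lfcMax old :=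
      pvGetD_of_get? _ c.1 (0, 0) _ hredget
    have hBitems : (pvFB g c).items
        = g.items.map (fun p => if p.1 == c.1 then (c.1, old ++ [(c.2.1, c.2.2)]) else p) := by
      rw [pvFB, hgetD]
      exact PySem.Dict.items_insert_of_contains g _ hc
    have hkeyuniq : ∀ p ∈ g.items, p.1 = c.1 → p.2 = old := by
      intro p hp hpk
      have := PySem.Dict.get?_of_mem_items g (k := p.1) (v := p.2) hp hnd
      rw [hpk, hget] at this
      exact (Option.some_inj.mp this).symm
    by_cases hlt : (lfcMax old).2 < c.2.2
    · -- newer timestamp: both sides replace the record for this id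
      have hA : pvFA (pvReduce g) c = (pvReduce g).insert c.1 (c.2.1, c.2.2) := by
        rw [pvFA, hredgetD]
        simp [pvReduce_contains, hc, hlt]
      apply PySem.Dict.ext
      rw [hA, PySem.Dict.items_insert_of_contains _ _ (by rw [pvReduce_contains]; exact hc)]
      simp only [pvReduce, pvItems_mk]
      rw [hBitems, List.map_map, List.map_map]
      apply List.map_congr_left
      intro p hp
      by_cases hpk : p.1 = c.1
      · simp [Function.comp, hpk, pvMax_append old _ holdne, hlt]
      · simp [Function.comp, hpk]
    · -- older-or-equal timestamp: A keeps its record, B's group max is unchanged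
      have hA : pvFA (pvReduce g) c = pvReduce g := by
        rw [pvFA, hredgetD]
        simp [pvReduce_contains, hc, hlt]
      apply PySem.Dict.ext
      rw [hA]
      simp only [pvReduce, pvItems_mk]
      rw [hBitems, List.map_map]
      symm
      apply List.map_congr_left
      intro p hp
      by_cases hpk : p.1 = c.1
      · have hpold : p.2 = old := hkeyuniq p hp hpk
        have hupd : (if (p.1 == c.1) = true then (c.1, old ++ [(c.2.1, c.2.2)]) else p)
            = (c.1, old ++ [(c.2.1, c.2.2)]) := by simp [hpk]
        simp only [Function.comp, hupd]
        rw [pvMax_append old _ holdne, if_neg hlt, hpk, hpold]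
      · simp [Function.comp, hpk]
  · -- fresh id: both sides append a new entry
    have hc' : g.contains c.1 = false := by simpa using hc
    have hget : g.get? c.1 = none := by
      rw [PySem.Dict.get?_eq_none_iff_contains]
      exact hc'
    have hgetD : g.getD c.1 [] = [] := pvGetD_of_none g c.1 [] hget
    have hA : pvFA (pvReduce g) c = (pvReduce g).insert c.1 (c.2.1, c.2.2) := by
      rw [pvFA]
      simp [pvReduce_contains, hc']
    have hB : pvFB g c = g.insert c.1 [(c.2.1, c.2.2)] := by
      rw [pvFB, hgetD]; simp
    apply PySem.Dict.ext
    rw [hA, PySem.Dict.items_insert_of_not_contains _ _ (by rw [pvReduce_contains]; exact hc'), hB]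
    simp only [pvReduce, pvItems_mk]
    rw [PySem.Dict.items_insert_of_not_contains _ _ hc']
    simp [pvMax_singleton]

lemma pvFB_keeps_nodup (g : PySem.Dict Int (List (Int × Int))) (c : Int × Int × Int)
    (hnd : g.keys.Nodup) : (pvFB g c).keys.Nodup :=
  PySem.Dict.nodup_keys_insert g _ _ hnd

lemma pvFB_keeps_ne (g : PySem.Dict Int (List (Int × Int))) (c : Int × Int × Int)
    (hne : ∀ p ∈ g.items, p.2 ≠ []) : ∀ p ∈ (pvFB g c).items, p.2 ≠ [] := by
  intro p hp
  rcases (PySem.Dict.mem_items_insert _ _ _ p).mp hp with h | h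
  · subst h; simp
  · exact hne _ h.1

-- the running-max fold simulates the grouping fold
lemma pvCore : ∀ (cs : List (Int × Int × Int)) (g : PySem.Dict Int (List (Int × Int))),
    g.keys.Nodup → (∀ p ∈ g.items, p.2 ≠ []) →
    cs.foldl pvFA (pvReduce g) = pvReduce (cs.foldl pvFB g) := by
  intro cs
  induction cs with
  | nil => intro g _ _; rfl
  | cons c cs ih =>
    intro g hnd hne
    rw [List.foldl_cons, List.foldl_cons, pvStep_preserve g c hnd hne]
    exact ih _ (pvFB_keeps_nodup g c hnd) (pvFB_keeps_ne g c hne)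

-- ===== VERDICT =====
theorem last_followers_count_spec : Claim_equal_last_followers_count := by
  intro data hdom hpre
  unfold Spec_last_followers_count last_followers_count last_followers_count_alt
  rw [pvStepA_eq, pvStepB_eq, pvFoldlRange3 pvFA data hpre, pvFoldlRange3 pvFB data hpre]
  have hinit : pvReduce PySem.Dict.empty = PySem.Dict.empty := rfl
  have h := pvCore (pvChunks data) PySem.Dict.empty
    (by simp)
    (by intro p hp; simp [PySem.Dict.empty] at hp)
  rw [hinit] at h
  rw [h, pvReduce, pvItems_mk]
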